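-- pv_equiv track=rewrite | github.com/fangrh/bibliography-skills | scripts/bib_extractor.py | _make_unique_key
-- ===== SOURCE A (Python) =====
-- def _make_unique_key(base_key: str, existing_keys: set) -> str:
--     """Make a key unique by adding suffix."""
--     for suffix in ['a', 'b', 'c', 'd', 'e', 'f']:
--         new_key = base_key + suffix
--         if new_key not in existing_keys:
--             return new_key
--
--     i = 1
--     while f'{base_key}{i}' in existing_keys:
--         i += 1
--     return f'{base_key}{i}'
-- ===== SOURCE B (Python) =====
-- def _make_unique_key(base_key: str, existing_keys: set) -> str:
--     """Make a key unique by adding a suffix (letters a-f, then 1, 2, 3, ...).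
--
--     Different strategy: strip the base_key prefix once to get the set of
--     suffixes already taken, then pick the first free letter; if none, compute
--     the smallest free positive integer directly from the sorted list of
--     canonical numeric suffixes (one pass), instead of probing the key set
--     candidate by candidate.
--     """
--     n = len(base_key)
--     suffixes = {k[n:] for k in existing_keys if k.startswith(base_key)}
--     for c in 'abcdef':
--         if c not in suffixes:
--             return base_key + c
--     numeral = sorted((s for s in suffixes
--                       if s.isdigit() and not s.startswith('0')),
--                      key=lambda s: (len(s), s))
--     ans = 1
--     for s in numeral:
--         if s == str(ans):
--             ans += 1
--     return base_key + str(ans)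
-- ===== Notes on version B (the rewrite author's own statement) =====
-- stated objective: alternative
-- what changed: Instead of probing the key set candidate by candidate, B strips the base_key prefix once to form the set of taken suffixes, picks the first free letter from it, and otherwise computes the smallest free positive integer directly by scanning the canonical numeric suffixes sorted by (length, lexicographic) order with a counter.
import Mathlib
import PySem

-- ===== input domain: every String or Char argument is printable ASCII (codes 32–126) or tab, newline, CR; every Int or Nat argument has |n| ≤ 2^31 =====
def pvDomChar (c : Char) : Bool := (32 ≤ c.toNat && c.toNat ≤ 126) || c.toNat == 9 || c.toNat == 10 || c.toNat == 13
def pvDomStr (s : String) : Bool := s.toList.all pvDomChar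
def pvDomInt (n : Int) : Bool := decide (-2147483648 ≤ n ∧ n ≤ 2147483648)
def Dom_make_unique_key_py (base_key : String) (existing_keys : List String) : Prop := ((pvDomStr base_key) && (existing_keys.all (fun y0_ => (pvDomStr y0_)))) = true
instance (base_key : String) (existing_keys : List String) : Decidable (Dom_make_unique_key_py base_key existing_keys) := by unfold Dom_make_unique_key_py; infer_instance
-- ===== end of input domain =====

-- B replaces A's candidate-by-candidate probing of the key set with a prefix-stripping pass
-- (one suffix set) plus a sorted scan of the canonical numeric suffixes that yields the
-- smallest free integer directly; alternative strategy, no speed claim.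

-- ===== PORT A =====
-- the `while f'{base_key}{i}' in existing_keys: i += 1` loop; fuel = keys.length + 1 bounds it
-- (that many distinct numeric candidates cannot all be members), the fuel-exhaustion branch is
-- unreachable.  Strings are carried as their character lists (PySem's recommended encoding).
def pvLoopA (bs : List Char) (keys : List (List Char)) : Int → Nat → List Char
  | _, 0 => bs
  | i, fuel+1 =>
    if keys.contains (bs ++ PySem.Int.toChars i)
    then pvLoopA bs keys (i+1) fuel
    else bs ++ PySem.Int.toChars i

-- the `for suffix in ['a','b','c','d','e','f']` loop with early return
def pvLettersA (bs : List Char) (keys : List (List Char)) : List (List Char) → List Char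
  | [] => pvLoopA bs keys 1 (keys.length + 1)
  | s :: rest =>
    if keys.contains (bs ++ s)
    then pvLettersA bs keys rest
    else bs ++ s

def make_unique_key_py (base_key : String) (existing_keys : List String) : String :=
  String.ofList (pvLettersA base_key.toList (existing_keys.map String.toList)
    [['a'], ['b'], ['c'], ['d'], ['e'], ['f']])

-- ===== PORT B =====
-- `s.isdigit() and not s.startswith('0')`
def pvCanon (s : List Char) : Bool :=
  PySem.Chars.strIsdigit s && !(PySem.Chars.startswith s ['0'])

-- `{k[n:] for k in existing_keys if k.startswith(base_key)}`
def pvSuffixes (bs : List Char) (keys : List (List Char)) : PySem.Set (List Char) :=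
  PySem.Set.ofList ((keys.filter (fun k => PySem.Chars.startswith k bs)).map
    (fun k => PySem.Chars.slice k (some (PySem.Chars.len bs)) none))

def make_unique_key_py_alt (base_key : String) (existing_keys : List String) : String :=
  let bs := base_key.toList
  let suffixes := pvSuffixes bs (existing_keys.map String.toList)
  match ['a','b','c','d','e','f'].find? (fun c => !(PySem.Set.contains suffixes [c])) with
  | some c => String.ofList (bs ++ [c])
  | none =>
    let numeral := PySem.List.sorted2 (suffixes.filter pvCanon)
      (fun s => s.length) (fun s => s)
    let ans := numeral.foldl
      (fun (a : Int) s => if s == PySem.Int.toChars a then a + 1 else a) 1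
    String.ofList (bs ++ PySem.Int.toChars ans)

-- ===== PRECONDITION & SPEC =====
def Spec_make_unique_key_py (base_key : String) (existing_keys : List String) (out : String) : Prop := out = make_unique_key_py_alt base_key existing_keys
instance (base_key : String) (existing_keys : List String) (out : String) : Decidable (Spec_make_unique_key_py base_key existing_keys out) := by unfold Spec_make_unique_key_py; infer_instance

-- ===== CLAIM (what is proved, stated in full; the proofs are below) =====
def Claim_equal_make_unique_key_py : Prop := ∀ (base_key : String) (existing_keys : List String), Dom_make_unique_key_py base_key existing_keys → Spec_make_unique_key_py base_key existing_keys (make_unique_key_py base_key existing_keys)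

-- ===== LEMMAS AND PROOFS =====

def pvBE (m : Nat) : List Char := ((Nat.digits 10 m).map Nat.digitChar).reverse
def pvCharVal (c : Char) : Nat := c.toNat - 48
def pvVal (s : List Char) : Nat := Nat.ofDigits 10 (s.map pvCharVal).reverse

lemma pv_map_self {α : Type} (l : List α) (f : α → α) (h : ∀ x ∈ l, f x = x) : l.map f = l := by
  conv_rhs => rw [← List.map_id l]
  exact List.map_congr_left h

lemma pv_char_eq {c d : Char} (h : c.toNat = d.toNat) : c = d :=
  Char.ext (UInt32.toNat_inj.mp h)

lemma pv_digitChar_digit_of_isdigit {c : Char} (h : PySem.Chars.isdigit c = true) :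
    pvCharVal c < 10 ∧ Nat.digitChar (pvCharVal c) = c := by
  simp only [PySem.Chars.isdigit, Bool.and_eq_true, decide_eq_true_eq, Char.le_def] at h
  obtain ⟨h1, h2⟩ := h
  have h1' : 48 ≤ c.toNat := h1
  have h2' : c.toNat ≤ 57 := h2
  have hlt : pvCharVal c < 10 := by unfold pvCharVal; omega
  have hval : c.toNat = pvCharVal c + 48 := by unfold pvCharVal; omega
  refine ⟨hlt, ?_⟩
  interval_cases hh : (pvCharVal c) <;> (apply pv_char_eq; rw [hval]; decide)

lemma pv_isdigit_of_digitChar {d : Nat} (hd : d < 10) :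
    PySem.Chars.isdigit (Nat.digitChar d) = true := by
  interval_cases d <;> decide

lemma pv_charVal_digitChar {d : Nat} (hd : d < 10) : pvCharVal (Nat.digitChar d) = d := by
  interval_cases d <;> decide

lemma pv_digitChar_lt {x y : Nat} (hx : x < 10) (hy : y < 10) :
    (Nat.digitChar x < Nat.digitChar y ↔ x < y) := by
  interval_cases x <;> interval_cases y <;> decide

lemma pv_digitChar_ne_zeroChar {d : Nat} (hd : d < 10) (h0 : d ≠ 0) :
    Nat.digitChar d ≠ '0' := by
  interval_cases d <;> simp_all <;> decide

lemma pv_val_pvBE (m : Nat) : pvVal (pvBE m) = m := by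
  unfold pvVal pvBE
  rw [List.map_reverse, List.reverse_reverse, List.map_map]
  have : ((Nat.digits 10 m).map (pvCharVal ∘ Nat.digitChar)) = Nat.digits 10 m := by
    exact pv_map_self _ _ (fun d hd => pv_charVal_digitChar (Nat.digits_lt_base (by norm_num) hd))
  rw [this, Nat.ofDigits_digits]

lemma pv_pvBE_inj {m k : Nat} (h : pvBE m = pvBE k) : m = k := by
  have := pv_val_pvBE m
  rw [h, pv_val_pvBE] at this
  omega

lemma pv_canon_pvBE {m : Nat} (hm : 0 < m) : pvCanon (pvBE m) = true := by
  have hne : Nat.digits 10 m ≠ [] := Nat.digits_ne_nil_iff_ne_zero.mpr (by omega)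
  unfold pvCanon
  rw [Bool.and_eq_true]
  constructor
  · unfold PySem.Chars.strIsdigit
    rw [Bool.and_eq_true]
    constructor
    · simp [pvBE, hne]
    · rw [List.all_eq_true]
      intro c hc
      simp only [pvBE, List.mem_reverse, List.mem_map] at hc
      obtain ⟨d, hd, rfl⟩ := hc
      exact pv_isdigit_of_digitChar (Nat.digits_lt_base (by norm_num) hd)
  · simp only [PySem.Chars.startswith, Bool.not_eq_true']
    rw [← Bool.not_eq_true, List.isPrefixOf_iff_prefix]
    intro hpre
    have hhead : (pvBE m).head? = some '0' := by
      obtain ⟨t, ht⟩ := hpre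
      rw [← ht]; rfl
    rw [pvBE, List.head?_reverse, List.getLast?_map] at hhead
    rw [List.getLast?_eq_some_getLast hne] at hhead
    simp only [Option.map_some] at hhead
    have hlast := Nat.getLast_digit_ne_zero 10 (m := m) (by omega)
    have hlt := Nat.digits_lt_base (b := 10) (by norm_num) (List.getLast_mem hne)
    exact pv_digitChar_ne_zeroChar hlt hlast (by simpa using hhead)

lemma pv_canon_complete {s : List Char} (h : pvCanon s = true) :
    0 < pvVal s ∧ pvBE (pvVal s) = s := by
  unfold pvCanon at h
  rw [Bool.and_eq_true] at h
  obtain ⟨hdig, hpre⟩ := h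
  unfold PySem.Chars.strIsdigit at hdig
  rw [Bool.and_eq_true] at hdig
  obtain ⟨hne, hall⟩ := hdig
  have hne' : s ≠ [] := by simpa [List.isEmpty_iff] using hne
  rw [List.all_eq_true] at hall
  have hlt : ∀ c ∈ s, pvCharVal c < 10 :=
    fun c hc => (pv_digitChar_digit_of_isdigit (hall c hc)).1
  have hdc : ∀ c ∈ s, Nat.digitChar (pvCharVal c) = c :=
    fun c hc => (pv_digitChar_digit_of_isdigit (hall c hc)).2
  -- head is not '0'
  have hhead0 : ∀ (c : Char) (t : List Char), s = c :: t → pvCharVal c ≠ 0 := by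
    intro c t hst hv
    have hc : c ∈ s := by rw [hst]; exact List.mem_cons_self
    have : c = '0' := by
      have := hdc c hc; rw [hv] at this; exact this.symm
    rw [PySem.Chars.startswith] at hpre
    rw [Bool.not_eq_true', ← Bool.not_eq_true, List.isPrefixOf_iff_prefix] at hpre
    exact hpre ⟨t, by simp [hst, this]⟩
  have hdigits : Nat.digits 10 (pvVal s) = (s.map pvCharVal).reverse := by
    unfold pvVal
    apply Nat.digits_ofDigits 10 (by norm_num)
    · intro l hl
      rw [List.mem_reverse, List.mem_map] at hl
      obtain ⟨c, hc, rfl⟩ := hl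
      exact hlt c hc
    · intro hne2
      obtain ⟨c, t, hst⟩ : ∃ c t, s = c :: t := by
        cases s with
        | nil => exact absurd rfl hne'
        | cons c t => exact ⟨c, t, rfl⟩
      have h1 : (s.map pvCharVal).reverse.getLast? = some ((s.map pvCharVal).reverse.getLast hne2) :=
        List.getLast?_eq_some_getLast hne2
      rw [List.getLast?_reverse] at h1
      have h2 : (s.map pvCharVal).head? = some (pvCharVal c) := by
        rw [hst]; simp
      rw [h2, Option.some.injEq] at h1
      rw [← h1]
      exact hhead0 c t hst
  constructor
  · rcases Nat.eq_zero_or_pos (pvVal s) with h0 | h0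
    · rw [h0] at hdigits
      simp only [Nat.digits_zero] at hdigits
      have : s.map pvCharVal = [] := by
        have := congrArg List.reverse hdigits
        simpa using this.symm
      exact absurd (List.map_eq_nil_iff.mp this) hne'
    · exact h0
  · unfold pvBE
    rw [hdigits, List.map_reverse, List.reverse_reverse, List.map_map]
    exact pv_map_self _ _ hdc

lemma pv_toDigitsCore_eq : ∀ (f n : Nat) (ds : List Char), n < f → 0 < n →
    Nat.toDigitsCore 10 f n ds = ((Nat.digits 10 n).map Nat.digitChar).reverse ++ ds := by
  intro f
  induction f with
  | zero => omega
  | succ f ih =>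
    intro n ds hnf hn
    rw [Nat.toDigitsCore]
    by_cases h : n / 10 = 0
    · simp only [h]
      rw [Nat.digits_def' (by norm_num) hn, h, Nat.digits_zero]
      simp
    · simp only [if_neg h]
      rw [ih (n/10) _ (by omega) (by omega)]
      rw [Nat.digits_def' (by norm_num) hn]
      simp

lemma pv_toChars_pos (i : Int) (h : 1 ≤ i) : PySem.Int.toChars i = pvBE i.toNat := by
  unfold PySem.Int.toChars
  rw [if_neg (by omega)]
  unfold Nat.toDigits
  rw [pv_toDigitsCore_eq _ _ _ (by omega) (by omega)]
  simp [pvBE]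

lemma pv_len_pvBE {m : Nat} (hm : 0 < m) : (pvBE m).length = Nat.log 10 m + 1 := by
  unfold pvBE
  rw [List.length_reverse, List.length_map, Nat.length_digits 10 m (by norm_num) (by omega)]

lemma pv_ofDigits_lt (l : List Nat) (h : ∀ d ∈ l, d < 10) :
    Nat.ofDigits 10 l < 10 ^ l.length := by
  induction l with
  | nil => simp
  | cons d t ih =>
    rw [Nat.ofDigits_cons]
    have hd := h d List.mem_cons_self
    have ht := ih (fun x hx => h x (List.mem_cons_of_mem _ hx))
    have : (10:Nat) ^ (d :: t).length = 10 * 10 ^ t.length := by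
      rw [List.length_cons]; ring
    omega

lemma pv_lexval : ∀ (a b : List Nat), (∀ d ∈ a, d < 10) → (∀ d ∈ b, d < 10) →
    a.length = b.length →
    Nat.ofDigits 10 a.reverse < Nat.ofDigits 10 b.reverse →
    a.map Nat.digitChar < b.map Nat.digitChar := by
  intro a
  induction a with
  | nil =>
    intro b _ _ hlen hv
    rw [List.length_nil] at hlen
    rw [List.eq_nil_of_length_eq_zero hlen.symm] at hv
    simp at hv
  | cons x a' ih =>
    intro b ha hb hlen hv
    cases b with
    | nil => simp at hlen
    | cons y b' =>
      have hx := ha x List.mem_cons_self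
      have hy := hb y List.mem_cons_self
      have hlen' : a'.length = b'.length := by simpa using hlen
      have hva : Nat.ofDigits 10 (x :: a').reverse
          = Nat.ofDigits 10 a'.reverse + 10 ^ a'.length * x := by
        rw [List.reverse_cons, Nat.ofDigits_append]
        simp [Nat.ofDigits_singleton]
      have hvb : Nat.ofDigits 10 (y :: b').reverse
          = Nat.ofDigits 10 b'.reverse + 10 ^ b'.length * y := by
        rw [List.reverse_cons, Nat.ofDigits_append]
        simp [Nat.ofDigits_singleton]
      have hba : Nat.ofDigits 10 a'.reverse < 10 ^ a'.length := by
        have := pv_ofDigits_lt a'.reverse (by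
          intro d hd; exact ha d (List.mem_cons_of_mem _ (List.mem_reverse.mp hd)))
        simpa using this
      have hbb : Nat.ofDigits 10 b'.reverse < 10 ^ b'.length := by
        have := pv_ofDigits_lt b'.reverse (by
          intro d hd; exact hb d (List.mem_cons_of_mem _ (List.mem_reverse.mp hd)))
        simpa using this
      rcases Nat.lt_trichotomy x y with hxy | hxy | hxy
      · simp only [List.map_cons]
        rw [List.cons_lt_cons_iff]
        exact Or.inl ((pv_digitChar_lt hx hy).mpr hxy)
      · subst hxy
        simp only [List.map_cons]
        rw [List.cons_lt_cons_iff]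
        refine Or.inr ⟨rfl, ?_⟩
        apply ih b' (fun d hd => ha d (List.mem_cons_of_mem _ hd))
          (fun d hd => hb d (List.mem_cons_of_mem _ hd)) hlen'
        rw [hva, hvb, hlen'] at hv
        omega
      · exfalso
        rw [hva, hvb, hlen'] at hv
        have : 10 ^ b'.length * y + 10 ^ b'.length ≤ 10 ^ b'.length * x := by
          have : y + 1 ≤ x := hxy
          calc 10 ^ b'.length * y + 10 ^ b'.length = 10 ^ b'.length * (y+1) := by ring
          _ ≤ 10 ^ b'.length * x := Nat.mul_le_mul_left _ this
        omega

lemma pv_key_lt {j k : Nat} (hj : 0 < j) (hjk : j < k) :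
    (pvBE j).length < (pvBE k).length ∨
      ((pvBE j).length = (pvBE k).length ∧ pvBE j < pvBE k) := by
  have hk : 0 < k := by omega
  have hlog : Nat.log 10 j ≤ Nat.log 10 k := Nat.log_mono_right (by omega)
  have hlen : (pvBE j).length ≤ (pvBE k).length := by
    rw [pv_len_pvBE hj, pv_len_pvBE hk]; omega
  rcases Nat.lt_or_ge (pvBE j).length (pvBE k).length with h | h
  · exact Or.inl h
  · have heq : (pvBE j).length = (pvBE k).length := by omega
    refine Or.inr ⟨heq, ?_⟩
    have hmapeq : pvBE j = ((Nat.digits 10 j).reverse).map Nat.digitChar := by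
      rw [pvBE, List.map_reverse]
    have hmapeq' : pvBE k = ((Nat.digits 10 k).reverse).map Nat.digitChar := by
      rw [pvBE, List.map_reverse]
    rw [hmapeq, hmapeq']
    apply pv_lexval
    · intro d hd
      exact Nat.digits_lt_base (by norm_num) (List.mem_reverse.mp hd)
    · intro d hd
      exact Nat.digits_lt_base (by norm_num) (List.mem_reverse.mp hd)
    · have := heq
      rw [pvBE, pvBE] at this
      simpa using this
    · simpa [Nat.ofDigits_digits] using hjk

lemma pv_sorted2_eq_sorted (xs : List (List Char)) :
    PySem.List.sorted2 xs (fun s => s.length) (fun s => s) =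
      PySem.List.sorted xs (fun s => toLex (s.length, s)) := by
  have hfun : (fun (a b : List Char) => decide (a.length < b.length) ||
        (!decide (b.length < a.length) && decide (a < b)))
      = (fun (a b : List Char) => decide (toLex (a.length, a) < toLex (b.length, b))) := by
    funext a b
    have h : (decide (a.length < b.length) ||
        (!decide (b.length < a.length) && decide (a < b)))
        = decide (a.length < b.length ∨ (a.length = b.length ∧ a < b)) := by
      by_cases h1 : a.length < b.length <;> by_cases h2 : b.length < a.length <;>
        by_cases h3 : a < b <;> simp [h1, h2, h3] <;> omega
    rw [h]
    exact decide_eq_decide.mpr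
      (Iff.symm (Prod.Lex.toLex_lt_toLex (x := (a.length, a)) (y := (b.length, b))))
  unfold PySem.List.sorted2 PySem.List.sorted
  simp only [if_neg (by decide : ¬(false = true))]
  rw [hfun]

lemma pv_sorted2_eq (xs ys : List (List Char))
    (hperm : ys.Perm xs)
    (hsort : List.Pairwise (fun a b : List Char =>
      a.length < b.length ∨ (a.length = b.length ∧ a < b)) ys) :
    PySem.List.sorted2 xs (fun s => s.length) (fun s => s) = ys := by
  rw [pv_sorted2_eq_sorted]
  apply PySem.List.sorted_eq_of_perm_of_pairwise_lt xs ys _ hperm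
  apply hsort.imp
  intro a b h
  rw [Prod.Lex.toLex_lt_toLex]
  rcases h with h | ⟨h1, h2⟩
  · exact Or.inl h
  · exact Or.inr ⟨h1, h2⟩

def pvMex (a : Nat) : List Nat → Nat
  | [] => a
  | v :: t => if v = a then pvMex (a+1) t else pvMex a t

lemma pv_mex_of_forall_lt : ∀ (V : List Nat) (a : Nat), (∀ v ∈ V, a < v) → pvMex a V = a := by
  intro V
  induction V with
  | nil => intro a _; rfl
  | cons v t ih =>
    intro a h
    have hv := h v List.mem_cons_self
    rw [pvMex, if_neg (by omega)]
    exact ih a (fun w hw => h w (List.mem_cons_of_mem _ hw))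

lemma pv_mex_spec : ∀ (V : List Nat) (a : Nat), List.Pairwise (· < ·) V →
    a ≤ pvMex a V ∧ pvMex a V ≤ a + V.length ∧ pvMex a V ∉ V ∧
      (∀ j, a ≤ j → j < pvMex a V → j ∈ V) := by
  intro V
  induction V with
  | nil => intro a _; simp [pvMex]
  | cons v t ih =>
    intro a hp
    rw [List.pairwise_cons] at hp
    obtain ⟨hvt, hpt⟩ := hp
    by_cases hva : v = a
    · subst hva
      rw [pvMex, if_pos rfl]
      obtain ⟨h1, h2, h3, h4⟩ := ih (v+1) hpt
      refine ⟨by omega, by simp; omega, ?_, ?_⟩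
      · intro hmem
        rcases List.mem_cons.mp hmem with h | h
        · omega
        · exact h3 h
      · intro j hj hjm
        rcases Nat.eq_or_lt_of_le hj with h | h
        · exact List.mem_cons.mpr (Or.inl h.symm)
        · exact List.mem_cons.mpr (Or.inr (h4 j (by omega) hjm))
    · rw [pvMex, if_neg hva]
      rcases Nat.lt_or_ge a v with hav | hav
      · -- all of v :: t exceeds a
        have : pvMex a t = a := pv_mex_of_forall_lt t a (fun w hw => by
          have := hvt w hw; omega)
        rw [this]
        refine ⟨le_refl a, by simp, ?_, by omega⟩
        intro hmem
        rcases List.mem_cons.mp hmem with h | h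
        · omega
        · have := hvt a h; omega
      · -- v < a
        have hvlt : v < a := by omega
        obtain ⟨h1, h2, h3, h4⟩ := ih a hpt
        refine ⟨h1, by simp; omega, ?_, ?_⟩
        · intro hmem
          rcases List.mem_cons.mp hmem with h | h
          · omega
          · exact h3 h
        · intro j hj hjm
          exact List.mem_cons.mpr (Or.inr (h4 j hj hjm))

lemma pv_fold_eq_mex : ∀ (V : List Nat), (∀ v ∈ V, 0 < v) →
    ∀ a : Nat, 0 < a →
    (V.map pvBE).foldl (fun (x : Int) s => if s == PySem.Int.toChars x then x + 1 else x)
      (a : Int) = ((pvMex a V : Nat) : Int) := by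
  intro V
  induction V with
  | nil => intro _ a _; simp [pvMex]
  | cons v t ih =>
    intro hpos a ha
    have hv := hpos v List.mem_cons_self
    simp only [List.map_cons, List.foldl_cons]
    have htc : PySem.Int.toChars (a : Int) = pvBE a := by
      rw [pv_toChars_pos _ (by omega)]
      simp
    rw [htc]
    by_cases hva : v = a
    · subst hva
      rw [if_pos (by simp)]
      have : ((v : Int) + 1) = ((v + 1 : Nat) : Int) := by push_cast; ring
      rw [this, ih (fun w hw => hpos w (List.mem_cons_of_mem _ hw)) (v+1) (by omega)]
      rw [pvMex, if_pos rfl]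
    · rw [if_neg (by
        simp only [beq_iff_eq]
        intro h
        exact hva (pv_pvBE_inj h))]
      rw [ih (fun w hw => hpos w (List.mem_cons_of_mem _ hw)) a ha]
      rw [pvMex, if_neg hva]

lemma pv_set_contains_iff {α : Type} [BEq α] [LawfulBEq α] (s : PySem.Set α) (x : α) :
    PySem.Set.contains s x = true ↔ x ∈ s := by
  unfold PySem.Set.contains
  exact List.contains_iff_mem

lemma pv_bridge (bs t : List Char) (keys : List (List Char)) :
    keys.contains (bs ++ t) = PySem.Set.contains (pvSuffixes bs keys) t := by
  have hmem : (bs ++ t) ∈ keys ↔ t ∈ pvSuffixes bs keys := by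
    unfold pvSuffixes
    rw [PySem.Set.mem_ofList]
    rw [List.mem_map]
    constructor
    · intro h
      refine ⟨bs ++ t, ?_, ?_⟩
      · rw [List.mem_filter]
        refine ⟨h, ?_⟩
        simp only [PySem.Chars.startswith]
        rw [List.isPrefixOf_iff_prefix]
        exact ⟨t, rfl⟩
      · simp only [PySem.Chars.len, PySem.Chars.slice_eq_listSlice]
        rw [PySem.List.slice_from_natCast]
        simp
    · rintro ⟨k, hk, rfl⟩
      rw [List.mem_filter] at hk
      obtain ⟨hkmem, hkpre⟩ := hk
      simp only [PySem.Chars.startswith] at hkpre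
      rw [List.isPrefixOf_iff_prefix] at hkpre
      simp only [PySem.Chars.len, PySem.Chars.slice_eq_listSlice]
      rw [PySem.List.slice_from_natCast]
      rw [List.prefix_iff_eq_append.mp hkpre]
      exact hkmem
  unfold PySem.Set.contains
  by_cases h : (bs ++ t) ∈ keys
  · rw [List.contains_iff_mem.mpr h, Eq.comm, List.contains_iff_mem]
    exact hmem.mp h
  · have h2 : t ∉ pvSuffixes bs keys := fun hc => h (hmem.mpr hc)
    rw [Bool.eq_iff_iff]
    rw [List.contains_iff_mem, List.contains_iff_mem]
    constructor
    · intro hc; exact absurd hc h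
    · intro hc; exact absurd hc h2

lemma pv_set_ofList_len {α : Type} [BEq α] (xs : List α) :
    (PySem.Set.ofList xs).length ≤ xs.length := by
  rw [PySem.Set.ofList_eq_foldl]
  suffices h : ∀ (s : List α), (xs.foldl PySem.Set.add s).length ≤ s.length + xs.length by
    simpa using h []
  induction xs with
  | nil => intro s; simp
  | cons x t ih =>
    intro s
    rw [List.foldl_cons]
    have := ih (PySem.Set.add s x)
    have hadd : (PySem.Set.add s x).length ≤ s.length + 1 := by
      unfold PySem.Set.add
      split
      · omega
      · simp
    simp only [List.length_cons]
    omega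

lemma pv_suffixes_len (bs : List Char) (keys : List (List Char)) :
    (pvSuffixes bs keys).length ≤ keys.length := by
  unfold pvSuffixes
  calc (PySem.Set.ofList _).length ≤ _ := pv_set_ofList_len _
  _ ≤ keys.length := by
    rw [List.length_map]
    exact List.length_filter_le _ _

lemma pv_loopA_eq (bs : List Char) (keys : List (List Char)) (m : Nat) (hm : 0 < m)
    (htaken : ∀ j : Nat, 1 ≤ j → j < m → keys.contains (bs ++ pvBE j) = true)
    (hfree : keys.contains (bs ++ pvBE m) = false) :
    ∀ (fuel : Nat) (i : Nat), 0 < i → i ≤ m → m - i < fuel →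
      pvLoopA bs keys (i : Int) fuel = bs ++ pvBE m := by
  intro fuel
  induction fuel with
  | zero => omega
  | succ fuel ih =>
    intro i hi him hfu
    have htc : PySem.Int.toChars (i : Int) = pvBE i := by
      rw [pv_toChars_pos _ (by omega)]; simp
    rw [pvLoopA, htc]
    by_cases hieq : i = m
    · subst hieq
      rw [hfree]
      simp
    · rw [htaken i hi (by omega)]
      simp only [if_true]
      have : ((i : Int) + 1) = ((i + 1 : Nat) : Int) := by push_cast; ring
      rw [this]
      exact ih (i+1) (by omega) (by omega) (by omega)

lemma pv_letters_eq (bs : List Char) (keys : List (List Char)) (cs : List Char) :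
    pvLettersA bs keys (cs.map (fun c => [c])) =
      match cs.find? (fun c => !(PySem.Set.contains (pvSuffixes bs keys) [c])) with
      | some c => bs ++ [c]
      | none => pvLoopA bs keys 1 (keys.length + 1) := by
  induction cs with
  | nil => rfl
  | cons c t ih =>
    simp only [List.map_cons]
    rw [pvLettersA, pv_bridge]
    by_cases h : PySem.Set.contains (pvSuffixes bs keys) [c] = true
    · rw [if_pos h, List.find?_cons_of_neg (by rw [show ((pvSuffixes bs keys).contains [c]) = true from h]; decide), ih]
    · have h' : PySem.Set.contains (pvSuffixes bs keys) [c] = false := by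
        rw [Bool.eq_false_iff]; exact h
      rw [if_neg (by rw [h']; exact Bool.false_ne_true),
        List.find?_cons_of_pos (by rw [show ((pvSuffixes bs keys).contains [c]) = false from h']; decide)]

lemma pv_numeric_eq (bs : List Char) (keys : List (List Char)) :
    pvLoopA bs keys 1 (keys.length + 1) =
      bs ++ PySem.Int.toChars
        ((PySem.List.sorted2 ((pvSuffixes bs keys).filter pvCanon)
            (fun s => s.length) (fun s => s)).foldl
          (fun (a : Int) s => if s == PySem.Int.toChars a then a + 1 else a) 1) := by
  set NU := (pvSuffixes bs keys).filter pvCanon with hNU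
  have hNUcanon : ∀ s ∈ NU, pvCanon s = true := by
    intro s hs
    exact (List.mem_filter.mp hs).2
  have hNUsub : ∀ s ∈ NU, s ∈ pvSuffixes bs keys := by
    intro s hs
    exact (List.mem_filter.mp hs).1
  have hNUnodup : NU.Nodup := by
    rw [hNU]
    exact (PySem.Set.nodup_ofList _).filter _
  set VU := NU.map pvVal with hVU
  have hVUnodup : VU.Nodup := by
    apply List.Nodup.map_on _ hNUnodup
    intro x hx y hy hxy
    have hxc := pv_canon_complete (hNUcanon x hx)
    have hyc := pv_canon_complete (hNUcanon y hy)
    rw [← hxc.2, ← hyc.2, hxy]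
  have hVUpos : ∀ v ∈ VU, 0 < v := by
    intro v hv
    rw [hVU, List.mem_map] at hv
    obtain ⟨s, hs, rfl⟩ := hv
    exact (pv_canon_complete (hNUcanon s hs)).1
  set V := VU.mergeSort (· ≤ ·) with hV
  have hperm : V.Perm VU := List.mergeSort_perm VU _
  have hVnodup : V.Nodup := hperm.symm.nodup hVUnodup
  have hVpos : ∀ v ∈ V, 0 < v := fun v hv => hVUpos v (hperm.mem_iff.mp hv)
  have hVle : List.Pairwise (· ≤ ·) V := by
    have := List.sorted_mergeSort (le := fun a b : Nat => a ≤ b)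
      (by intro a b c h1 h2; simp at *; omega) (by intro a b; simp; omega) VU
    simpa using this
  have hVlt : List.Pairwise (· < ·) V := by
    have := hVle.and hVnodup
    exact this.imp (by intro a b ⟨h1, h2⟩; omega)
  -- the sorted canonical strings
  have hmapNU : VU.map pvBE = NU := by
    rw [hVU, List.map_map]
    apply pv_map_self
    intro s hs
    exact (pv_canon_complete (hNUcanon s hs)).2
  have hsorted : PySem.List.sorted2 NU (fun s => s.length) (fun s => s) = V.map pvBE := by
    apply pv_sorted2_eq
    · calc (V.map pvBE).Perm (VU.map pvBE) := hperm.map pvBE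
      _ = NU := hmapNU
    · rw [List.pairwise_map]
      apply List.Pairwise.imp_of_mem ?_ hVlt
      intro j k hj hk hjk
      exact pv_key_lt (hVpos j hj) hjk
  rw [hsorted]
  have hfold := pv_fold_eq_mex V hVpos 1 (by omega)
  simp only [Nat.cast_one] at hfold
  rw [hfold]
  set m := pvMex 1 V with hm
  obtain ⟨h1, h2, h3, h4⟩ := pv_mex_spec V 1 hVlt
  have hmpos : 0 < m := by omega
  have htc : PySem.Int.toChars ((m : Nat) : Int) = pvBE m := by
    rw [pv_toChars_pos _ (by omega)]; simp
  rw [htc]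
  have hmemV : ∀ j : Nat, 0 < j → (j ∈ V ↔ keys.contains (bs ++ pvBE j) = true) := by
    intro j hj
    rw [hperm.mem_iff, pv_bridge]
    constructor
    · intro hjVU
      rw [hVU, List.mem_map] at hjVU
      obtain ⟨s, hs, hval⟩ := hjVU
      have hc := pv_canon_complete (hNUcanon s hs)
      have hbej : pvBE j = s := by rw [← hval, hc.2]
      rw [hbej]
      exact (pv_set_contains_iff _ _).mpr (hNUsub s hs)
    · intro hcont
      have hmemS : pvBE j ∈ pvSuffixes bs keys := (pv_set_contains_iff _ _).mp hcont
      have hfilter : pvBE j ∈ NU := by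
        rw [hNU]; exact List.mem_filter.mpr ⟨hmemS, pv_canon_pvBE hj⟩
      rw [hVU, List.mem_map]
      exact ⟨pvBE j, hfilter, pv_val_pvBE j⟩
  have hVlen : V.length ≤ keys.length := by
    calc V.length = VU.length := hperm.length_eq
    _ = NU.length := by rw [hVU, List.length_map]
    _ ≤ (pvSuffixes bs keys).length := List.length_filter_le _ _
    _ ≤ keys.length := pv_suffixes_len bs keys
  have htaken : ∀ j : Nat, 1 ≤ j → j < m → keys.contains (bs ++ pvBE j) = true := by
    intro j hj hjm
    exact (hmemV j (by omega)).mp (h4 j hj hjm)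
  have hfree : keys.contains (bs ++ pvBE m) = false := by
    rcases h : keys.contains (bs ++ pvBE m) with _ | _
    · rfl
    · exact absurd ((hmemV m hmpos).mpr h) h3
  have := pv_loopA_eq bs keys m hmpos htaken hfree (keys.length + 1) 1
    (by omega) (by omega) (by omega)
  simpa using this

-- ===== VERDICT (by name: the statement is the Claim_ definition above) =====
theorem make_unique_key_py_spec : Claim_equal_make_unique_key_py := by
  intro base_key existing_keys _
  unfold Spec_make_unique_key_py make_unique_key_py make_unique_key_py_alt
  rw [show [['a'],['b'],['c'],['d'],['e'],['f']]
      = List.map (fun c => [c]) ['a','b','c','d','e','f'] from rfl]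
  rw [pv_letters_eq]
  cases hfind : List.find?
      (fun c => !(PySem.Set.contains
        (pvSuffixes base_key.toList (existing_keys.map String.toList)) [c]))
      ['a','b','c','d','e','f'] with
  | some c => simp only [hfind]
  | none =>
    simp only [hfind]
    exact congrArg String.ofList
      (pv_numeric_eq base_key.toList (existing_keys.map String.toList))
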